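-- pv_equiv track=rewrite | github.com/allenai/open-instruct | scripts/data/build_tmax_images.py | container_def_to_dockerfile
-- ===== SOURCE A (Python) =====
-- def container_def_to_dockerfile(container_def: str) -> str:
--     """Convert a Singularity/Apptainer def to a Dockerfile."""
--     base_image = "ubuntu:22.04"
--     post_commands = []
--
--     for line in container_def.splitlines():
--         stripped = line.strip()
--         if stripped.startswith("From:"):
--             base_image = stripped.split(":", 1)[1].strip()
--
--     in_post = False
--     for line in container_def.splitlines():
--         if line.strip() == "%post":
--             in_post = True
--             continue
--         if line.strip().startswith("%") and in_post:
--             break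
--         if in_post:
--             post_commands.append(line)
--
--     post_script = "\n".join(post_commands).strip()
--
--     # Write post commands as a script and execute it, since multi-line RUN
--     # with raw shell commands breaks Dockerfile parsing.
--     return (
--         f"FROM {base_image}\n"
--         f"ENV DEBIAN_FRONTEND=noninteractive\n"
--         f"COPY setup.sh /tmp/setup.sh\n"
--         f"RUN chmod +x /tmp/setup.sh && /tmp/setup.sh\n"
--         f"WORKDIR /workspace\n"
--     ), post_script
-- ===== SOURCE B (Python) =====
-- def container_def_to_dockerfile(container_def: str) -> str:
--     """Convert a Singularity/Apptainer def to a Dockerfile (single pass)."""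
--     base_image = "ubuntu:22.04"
--     post_commands = []
--     in_post = False
--     post_done = False
--
--     for line in container_def.splitlines():
--         stripped = line.strip()
--         if stripped.startswith("From:"):
--             base_image = stripped.split(":", 1)[1].strip()
--         if stripped == "%post":
--             in_post = True
--         elif in_post and not post_done:
--             if stripped.startswith("%"):
--                 post_done = True
--             else:
--                 post_commands.append(line)
--
--     post_script = "\n".join(post_commands).strip()
--     return (
--         f"FROM {base_image}\n"
--         f"ENV DEBIAN_FRONTEND=noninteractive\n"
--         f"COPY setup.sh /tmp/setup.sh\n"
--         f"RUN chmod +x /tmp/setup.sh && /tmp/setup.sh\n"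
--         f"WORKDIR /workspace\n"
--     ), post_script
-- ===== Notes on version B (the rewrite author's own statement) =====
-- stated objective: simpler
-- what changed: Replaces A's two separate passes over the lines (one scanning From:, one stateful post-block collector with break) by a single pass maintaining base_image, in_post and a post_done flag together.
import Mathlib
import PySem

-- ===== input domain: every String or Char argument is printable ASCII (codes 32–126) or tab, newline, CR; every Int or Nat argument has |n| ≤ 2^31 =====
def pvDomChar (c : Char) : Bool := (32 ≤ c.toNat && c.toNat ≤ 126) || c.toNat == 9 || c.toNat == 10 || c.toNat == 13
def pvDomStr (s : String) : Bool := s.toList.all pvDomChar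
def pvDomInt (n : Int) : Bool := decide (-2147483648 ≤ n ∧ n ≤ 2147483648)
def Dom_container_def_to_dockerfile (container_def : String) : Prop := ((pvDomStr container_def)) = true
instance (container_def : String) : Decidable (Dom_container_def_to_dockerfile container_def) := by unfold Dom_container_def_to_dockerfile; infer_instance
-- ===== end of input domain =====

-- B replaces A's two passes over the lines by a single pass carrying (base_image, post_commands, in_post, post_done); objective: simpler.

-- ===== PORT A =====
-- stripped.split(":", 1)[1].strip()  (the index [1] exists whenever it is evaluated, since stripped starts with "From:")
def pvFromBase (st : String) : String :=
  PySem.Str.strip (((PySem.Str.splitMax? st ":" 1).getD []).getD 1 "")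

-- one step of A's first loop (base_image scan)
def pvBaseStep (base : String) (line : String) : String :=
  let stripped := PySem.Str.strip line
  if PySem.Str.startswith stripped "From:" then pvFromBase stripped else base

-- A's second loop (post-block collector with break), structural recursion on the lines
def pvPostA : List String → Bool → List String
  | [], _ => []
  | line :: rest, in_post =>
    if PySem.Str.strip line = "%post" then pvPostA rest true
    else if PySem.Str.startswith (PySem.Str.strip line) "%" && in_post then []
    else if in_post then line :: pvPostA rest in_post
    else pvPostA rest in_post

def container_def_to_dockerfile (container_def : String) : String × String :=
  let lines := PySem.Str.splitlines container_def
  let base_image := lines.foldl pvBaseStep "ubuntu:22.04"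
  let post_script := PySem.Str.strip (PySem.Str.join "\n" (pvPostA lines false))
  ("FROM " ++ base_image ++ "\nENV DEBIAN_FRONTEND=noninteractive\nCOPY setup.sh /tmp/setup.sh\nRUN chmod +x /tmp/setup.sh && /tmp/setup.sh\nWORKDIR /workspace\n",
   post_script)

-- ===== PORT B =====
-- one step of B's single loop; state = (base_image, post_commands, in_post, post_done)
def pvStepB (s : String × List String × Bool × Bool) (line : String) :
    String × List String × Bool × Bool :=
  let stripped := PySem.Str.strip line
  let base := if PySem.Str.startswith stripped "From:" then pvFromBase stripped else s.1
  if stripped = "%post" then (base, s.2.1, true, s.2.2.2)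
  else if s.2.2.1 && !s.2.2.2 then
    if PySem.Str.startswith stripped "%" then (base, s.2.1, s.2.2.1, true)
    else (base, s.2.1 ++ [line], s.2.2.1, s.2.2.2)
  else (base, s.2.1, s.2.2.1, s.2.2.2)

def container_def_to_dockerfile_alt (container_def : String) : String × String :=
  let r := (PySem.Str.splitlines container_def).foldl pvStepB ("ubuntu:22.04", [], false, false)
  let post_script := PySem.Str.strip (PySem.Str.join "\n" r.2.1)
  ("FROM " ++ r.1 ++ "\nENV DEBIAN_FRONTEND=noninteractive\nCOPY setup.sh /tmp/setup.sh\nRUN chmod +x /tmp/setup.sh && /tmp/setup.sh\nWORKDIR /workspace\n",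
   post_script)

-- ===== PRECONDITION & SPEC =====
def Spec_container_def_to_dockerfile (container_def : String) (out : String × String) : Prop := out = container_def_to_dockerfile_alt container_def
instance (container_def : String) (out : String × String) : Decidable (Spec_container_def_to_dockerfile container_def out) := by unfold Spec_container_def_to_dockerfile; infer_instance

-- ===== CLAIM (what is proved, stated in full; the proofs are below) =====
def Claim_equal_container_def_to_dockerfile : Prop := ∀ (container_def : String), Dom_container_def_to_dockerfile container_def → Spec_container_def_to_dockerfile container_def (container_def_to_dockerfile container_def)

-- ===== LEMMAS AND PROOFS =====

-- once post_done = true, B's loop only keeps updating base_image (and in_post); post_commands are frozen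
theorem pvStepB_done (lines : List String) (b : String) (c : List String) :
    ∀ ip : Bool, ((lines.foldl pvStepB (b, c, ip, true)).1 = lines.foldl pvBaseStep b) ∧
      ((lines.foldl pvStepB (b, c, ip, true)).2.1 = c) := by
  induction lines generalizing b with
  | nil => intro ip; exact ⟨rfl, rfl⟩
  | cons line rest ih =>
    intro ip
    simp only [List.foldl_cons, pvStepB, pvBaseStep]
    by_cases h : PySem.Str.strip line = "%post" <;>
      simp only [h, if_true, if_false, Bool.and_false, Bool.not_true, if_neg (by simp : ¬ (false = true))] <;>
      split_ifs <;> exact ih _ _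

-- while post_done = false, B's single pass computes A's base-scan fold and appends exactly A's post-collector output
theorem pvStepB_run (lines : List String) (b : String) (c : List String) (ip : Bool) :
    ((lines.foldl pvStepB (b, c, ip, false)).1 = lines.foldl pvBaseStep b) ∧
      ((lines.foldl pvStepB (b, c, ip, false)).2.1 = c ++ pvPostA lines ip) := by
  induction lines generalizing b c ip with
  | nil => simp [pvPostA]
  | cons line rest ih =>
    simp only [List.foldl_cons, pvStepB, pvBaseStep, pvPostA]
    by_cases h : PySem.Str.strip line = "%post"
    · simp only [h, if_true]
      exact ih _ c true
    · simp only [h, if_false]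
      by_cases hip : ip
      · subst hip
        by_cases hp : PySem.Str.startswith (PySem.Str.strip line) "%" = true
        · simp only [hp, Bool.not_false, Bool.and_true, if_true, List.append_nil]
          exact pvStepB_done rest _ c true
        · simp only [hp, Bool.not_false, Bool.and_true, if_true]
          rcases ih (if PySem.Str.startswith (PySem.Str.strip line) "From:" = true
              then pvFromBase (PySem.Str.strip line) else b) (c ++ [line]) true with ⟨h1, h2⟩
          refine ⟨by simpa using h1, ?_⟩
          simp only [hp] at *
          simpa [List.append_assoc] using h2
      · simp only [Bool.not_eq_true] at hip
        subst hip
        simp only [Bool.and_false, Bool.false_and]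
        exact ih _ c false

-- ===== VERDICT (by name: the statement is the Claim_ definition above) =====
theorem container_def_to_dockerfile_spec : Claim_equal_container_def_to_dockerfile := by
  intro s _
  unfold Spec_container_def_to_dockerfile container_def_to_dockerfile container_def_to_dockerfile_alt
  rcases pvStepB_run (PySem.Str.splitlines s) "ubuntu:22.04" [] false with ⟨h1, h2⟩
  simp only [List.nil_append] at h2
  dsimp only
  rw [h1, h2]
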